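-- pv_equiv track=rewrite | github.com/digitaldna01/boston-univ | CAS CS 392/HW/HW4/e.py | lock
-- ===== SOURCE A (Python) =====
-- from itertools import product
--
-- def lock(n, angle):
--     ans = "NO"
--     # possible_array = []
--     possible_array = list(product([1, -1], repeat=n))
--     for subset in possible_array:
--         value = 0
--         for j in range(n):
--             value += subset[j] * angle[j]
--         if value % 360 == 0:
--             ans = "YES"
--
--     return ans
-- ===== SOURCE B (Python) =====
-- def lock(n, angle):
--     reach = {0}
--     for a in angle[:n]:
--         reach = {(r + a) % 360 for r in reach} | {(r - a) % 360 for r in reach}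
--     return "YES" if 0 in reach else "NO"
-- ===== Notes on version B (the rewrite author's own statement) =====
-- stated objective: faster
-- what changed: Replaces the brute-force enumeration of all 2^n sign assignments (itertools.product plus an inner index loop) by a dynamic program over the set of residues mod 360 reachable after each angle, returning YES iff residue 0 is reachable.
import Mathlib
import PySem

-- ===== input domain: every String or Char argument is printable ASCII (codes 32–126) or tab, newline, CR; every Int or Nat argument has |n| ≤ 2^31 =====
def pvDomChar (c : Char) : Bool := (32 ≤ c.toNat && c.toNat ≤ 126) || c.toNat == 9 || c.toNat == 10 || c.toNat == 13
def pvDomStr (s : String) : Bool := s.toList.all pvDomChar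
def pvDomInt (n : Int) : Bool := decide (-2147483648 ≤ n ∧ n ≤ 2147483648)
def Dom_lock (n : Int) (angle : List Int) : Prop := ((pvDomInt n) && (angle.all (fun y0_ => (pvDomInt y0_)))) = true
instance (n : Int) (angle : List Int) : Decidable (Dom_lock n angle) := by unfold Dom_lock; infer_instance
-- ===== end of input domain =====

-- B replaces A's O(2^n·n) enumeration of all sign assignments by a DP over reachable residues mod 360 (O(n·360)).

-- ===== PORT A =====
-- list(product([1, -1], repeat=n)): first coordinate varies slowest
def signsList : Nat → List (List Int)
  | 0 => [[]]
  | k + 1 => [(1 : Int), -1].flatMap (fun s => (signsList k).map (fun t => s :: t))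

def lock (n : Int) (angle : List Int) : String :=
  (signsList n.toNat).foldl
    (fun ans subset =>
      let value := (PySem.List.pyRange 0 n 1).foldl
        (fun v j => v + PySem.List.pyGetD subset j 0 * PySem.List.pyGetD angle j 0) 0
      if PySem.Int.mod value 360 == 0 then "YES" else ans)
    "NO"

-- ===== PORT B =====
def lock_alt (n : Int) (angle : List Int) : String :=
  let reach : PySem.Set Int :=
    (PySem.List.slice angle none (some n)).foldl
      (fun R a => PySem.Set.union
          (PySem.Set.ofList (R.map (fun r => PySem.Int.mod (r + a) 360)))
          (R.map (fun r => PySem.Int.mod (r - a) 360)))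
      (PySem.Set.ofList [0])
  if PySem.Set.contains reach 0 then "YES" else "NO"

-- ===== PRECONDITION & SPEC =====
-- Pre_ excludes exactly the inputs where A raises: n < 0 (ValueError from product's repeat) and n > len(angle) (IndexError).
def Pre_lock (n : Int) (angle : List Int) : Prop := 0 ≤ n ∧ n ≤ angle.length
instance (n : Int) (angle : List Int) : Decidable (Pre_lock n angle) := by unfold Pre_lock; infer_instance

def pvWitness_lock : Int × List Int := (2, [180, 180])

def Spec_lock (n : Int) (angle : List Int) (out : String) : Prop := out = lock_alt n angle
instance (n : Int) (angle : List Int) (out : String) : Decidable (Spec_lock n angle out) := by unfold Spec_lock; infer_instance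

-- ===== CLAIM (what is proved, stated in full; the proofs are below) =====
def Claim_equal_lock : Prop := ∀ (n : Int) (angle : List Int), Dom_lock n angle → Pre_lock n angle → Spec_lock n angle (lock n angle)

-- ===== LEMMAS AND PROOFS =====

-- the ± dot product both programs are (implicitly or explicitly) about
def dotp : List Int → List Int → Int
  | a :: s, b :: l => a * b + dotp s l
  | _, _ => 0

lemma mem_signsList (k : Nat) (s : List Int) :
    s ∈ signsList k ↔ s.length = k ∧ ∀ x ∈ s, x = 1 ∨ x = -1 := by
  induction k generalizing s with
  | zero =>
    simp only [signsList, List.mem_singleton, List.length_eq_zero_iff]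
    constructor
    · rintro rfl; exact ⟨rfl, by simp⟩
    · rintro ⟨rfl, _⟩; rfl
  | succ k ih =>
    simp only [signsList, List.mem_flatMap, List.mem_map]
    constructor
    · rintro ⟨σ, hσ, t, ht, rfl⟩
      obtain ⟨hlen, hall⟩ := (ih t).mp ht
      refine ⟨by simp [hlen], ?_⟩
      intro x hx
      rcases List.mem_cons.mp hx with rfl | hx
      · simpa using hσ
      · exact hall x hx
    · rintro ⟨hlen, hall⟩
      cases s with
      | nil => simp at hlen
      | cons a t =>
        refine ⟨a, by simpa using hall a (by simp), t, (ih t).mpr ⟨by simpa using hlen, ?_⟩, rfl⟩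
        exact fun x hx => hall x (List.mem_cons_of_mem _ hx)

lemma dotp_take (s l : List Int) (m : Nat) (h : s.length ≤ m) :
    dotp s (l.take m) = dotp s l := by
  induction s generalizing l m with
  | nil => cases l <;> cases m <;> simp [dotp]
  | cons a s ih =>
    cases m with
    | zero => simp at h
    | succ m =>
      cases l with
      | nil => simp [dotp]
      | cons b l => simp only [List.take_succ_cons, dotp]; rw [ih l m (by simpa using h)]

lemma foldl_flag (p : List Int → Bool) (l : List (List Int)) (init : String) :
    l.foldl (fun ans s => if p s then "YES" else ans) init
      = if l.any p then "YES" else init := by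
  induction l generalizing init with
  | nil => simp
  | cons a l ih =>
    simp only [List.foldl_cons, List.any_cons, ih]
    by_cases h : p a = true <;> simp [h]

lemma range_foldl_dotp (s l : List Int) (h : s.length ≤ l.length) (init : Int) :
    (List.range s.length).foldl (fun v k => v + s.getD k 0 * l.getD k 0) init
      = init + dotp s l := by
  induction s generalizing l init with
  | nil => cases l <;> simp [dotp]
  | cons a s ih =>
    cases l with
    | nil => simp at h
    | cons b l =>
      simp only [List.length_cons]
      rw [List.range_succ_eq_map]
      simp only [List.foldl_cons, List.foldl_map, List.getD_cons_zero, List.getD_cons_succ]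
      rw [ih l (by simpa using h) (init + a * b)]
      simp [dotp]; ring

lemma value_eq_dotp (n : Int) (angle s : List Int) (_h0 : 0 ≤ n)
    (hs : s.length = n.toNat) (hlen : n ≤ angle.length) :
    (PySem.List.pyRange 0 n 1).foldl
        (fun v j => v + PySem.List.pyGetD s j 0 * PySem.List.pyGetD angle j 0) 0
      = dotp s angle := by
  rw [PySem.List.pyRange_one]
  simp only [List.foldl_map, zero_add, PySem.List.pyGetD_natCast, sub_zero]
  rw [← hs, range_foldl_dotp s angle (by omega) 0, zero_add]

-- A returns "YES" iff some sign assignment gives a multiple of 360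
lemma lock_eq_yes_iff (n : Int) (angle : List Int) (h0 : 0 ≤ n) (hlen : n ≤ angle.length) :
    lock n angle = "YES" ↔
      ∃ s ∈ signsList n.toNat, (dotp s angle) % 360 = 0 := by
  unfold lock
  rw [foldl_flag]
  constructor
  · intro h
    by_cases hc : (signsList n.toNat).any
        (fun subset => PySem.Int.mod
          ((PySem.List.pyRange 0 n 1).foldl
            (fun v j => v + PySem.List.pyGetD subset j 0 * PySem.List.pyGetD angle j 0) 0) 360 == 0) = true
    · obtain ⟨s, hs, hp⟩ := List.any_eq_true.mp hc
      obtain ⟨hlens, _⟩ := (mem_signsList _ _).mp hs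
      refine ⟨s, hs, ?_⟩
      rw [value_eq_dotp n angle s h0 hlens hlen] at hp
      rw [← PySem.Int.mod_eq_emod_of_pos (by norm_num : (0:Int) < 360)]
      exact beq_iff_eq.mp hp
    · rw [if_neg hc] at h; exact absurd h (by decide)
  · rintro ⟨s, hs, hmod⟩
    obtain ⟨hlens, _⟩ := (mem_signsList _ _).mp hs
    have : (signsList n.toNat).any
        (fun subset => PySem.Int.mod
          ((PySem.List.pyRange 0 n 1).foldl
            (fun v j => v + PySem.List.pyGetD subset j 0 * PySem.List.pyGetD angle j 0) 0) 360 == 0) = true := by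
      refine List.any_eq_true.mpr ⟨s, hs, ?_⟩
      rw [value_eq_dotp n angle s h0 hlens hlen, beq_iff_eq,
        PySem.Int.mod_eq_emod_of_pos (by norm_num : (0:Int) < 360)]
      exact hmod
    rw [if_pos this]

-- B's DP step
def stepB (R : List Int) (a : Int) : List Int :=
  PySem.Set.union
    (PySem.Set.ofList (R.map (fun r => PySem.Int.mod (r + a) 360)))
    (R.map (fun r => PySem.Int.mod (r - a) 360))

lemma mem_stepB (R : List Int) (a x : Int) :
    x ∈ stepB R a ↔ ∃ r ∈ R, x = (r + a) % 360 ∨ x = (r - a) % 360 := by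
  unfold stepB
  rw [PySem.Set.mem_union, PySem.Set.mem_ofList]
  simp only [List.mem_map, PySem.Int.mod_eq_emod_of_pos (by norm_num : (0:Int) < 360)]
  constructor
  · rintro (⟨r, hr, rfl⟩ | ⟨r, hr, rfl⟩)
    · exact ⟨r, hr, Or.inl rfl⟩
    · exact ⟨r, hr, Or.inr rfl⟩
  · rintro ⟨r, hr, rfl | rfl⟩
    · exact Or.inl ⟨r, hr, rfl⟩
    · exact Or.inr ⟨r, hr, rfl⟩

lemma invariantB (l : List Int) (R : List Int) (hred : ∀ r ∈ R, r % 360 = r) (x : Int) :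
    x ∈ l.foldl stepB R ↔
      ∃ s, s.length = l.length ∧ (∀ y ∈ s, y = 1 ∨ y = -1) ∧
        ∃ r ∈ R, x = (r + dotp s l) % 360 := by
  induction l generalizing R with
  | nil =>
    simp only [List.foldl_nil, List.length_nil]
    constructor
    · intro hx
      exact ⟨[], rfl, by simp, x, hx, by simp [dotp, hred x hx]⟩
    · rintro ⟨s, hs, _, r, hr, rfl⟩
      rw [List.length_eq_zero_iff] at hs; subst hs
      simpa [dotp, hred r hr] using hr
  | cons a l ih =>
    rw [List.foldl_cons, ih (stepB R a) ?hred]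
    case hred =>
      intro r hr
      obtain ⟨r0, _, rfl | rfl⟩ := (mem_stepB R a r).mp hr <;> exact Int.emod_emod_of_dvd _ dvd_rfl
    constructor
    · rintro ⟨s', hlen', hall', r', hr', rfl⟩
      obtain ⟨r, hr, rfl | rfl⟩ := (mem_stepB R a r').mp hr'
      · refine ⟨1 :: s', by simp [hlen'], ?_, r, hr, ?_⟩
        · intro y hy
          rcases List.mem_cons.mp hy with rfl | hy'
          · exact Or.inl rfl
          · exact hall' y hy'
        · simp [dotp, Int.emod_add_emod]; ring_nf
      · refine ⟨-1 :: s', by simp [hlen'], ?_, r, hr, ?_⟩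
        · intro y hy
          rcases List.mem_cons.mp hy with rfl | hy'
          · exact Or.inr rfl
          · exact hall' y hy'
        · simp [dotp, Int.emod_add_emod, sub_eq_add_neg]; ring_nf
    · rintro ⟨s, hlen, hall, r, hr, rfl⟩
      cases s with
      | nil => simp at hlen
      | cons σ s' =>
        rcases hall σ (by simp) with rfl | rfl
        · refine ⟨s', by simpa using hlen, fun y hy => hall y (List.mem_cons_of_mem _ hy),
            (r + a) % 360, (mem_stepB R a _).mpr ⟨r, hr, Or.inl rfl⟩, ?_⟩
          simp [dotp, Int.emod_add_emod]; ring_nf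
        · refine ⟨s', by simpa using hlen, fun y hy => hall y (List.mem_cons_of_mem _ hy),
            (r - a) % 360, (mem_stepB R a _).mpr ⟨r, hr, Or.inr rfl⟩, ?_⟩
          simp [dotp, Int.emod_add_emod, sub_eq_add_neg]; ring_nf

lemma lock_alt_eq_yes_iff (n : Int) (angle : List Int) (h0 : 0 ≤ n) (hlen : n ≤ angle.length) :
    lock_alt n angle = "YES" ↔
      ∃ s ∈ signsList n.toNat, (dotp s angle) % 360 = 0 := by
  unfold lock_alt
  rw [PySem.List.slice_to _ h0]
  have hstep : (fun (R : List Int) (a : Int) => PySem.Set.union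
      (PySem.Set.ofList (R.map (fun r => PySem.Int.mod (r + a) 360)))
      (R.map (fun r => PySem.Int.mod (r - a) 360))) = stepB := rfl
  rw [hstep]
  have hofl : PySem.Set.ofList ([0] : List Int) = [0] := by decide
  rw [hofl]
  have htlen : (angle.take n.toNat).length = n.toNat := by
    simp [List.length_take]; omega
  have hmem := invariantB (angle.take n.toNat) [0] (by intro r hr; simp at hr; simp [hr]) 0
  constructor
  · intro h
    by_cases hc : PySem.Set.contains ((angle.take n.toNat).foldl stepB [0]) 0 = true
    · have h0mem := (PySem.Set.contains_iff _ _).mp hc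
      obtain ⟨s, hslen, hall, r, hrR, hx⟩ := hmem.mp h0mem
      simp only [List.mem_singleton] at hrR; subst hrR
      refine ⟨s, (mem_signsList _ _).mpr ⟨by omega, hall⟩, ?_⟩
      rw [← dotp_take s angle n.toNat (by omega)]
      simpa using hx.symm
    · rw [if_neg hc] at h; exact absurd h (by decide)
  · rintro ⟨s, hs, hmod⟩
    obtain ⟨hslen, hall⟩ := (mem_signsList _ _).mp hs
    have h0mem : (0 : Int) ∈ (angle.take n.toNat).foldl stepB [0] := by
      refine hmem.mpr ⟨s, by omega, hall, 0, by simp, ?_⟩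
      rw [dotp_take s angle n.toNat (by omega)]
      simpa using hmod.symm
    rw [if_pos ((PySem.Set.contains_iff _ _).mpr h0mem)]

lemma lock_values (n : Int) (angle : List Int) :
    lock n angle = "YES" ∨ lock n angle = "NO" := by
  unfold lock
  rw [foldl_flag]
  split
  · exact Or.inl rfl
  · exact Or.inr rfl

lemma lock_alt_values (n : Int) (angle : List Int) :
    lock_alt n angle = "YES" ∨ lock_alt n angle = "NO" := by
  unfold lock_alt
  simp only []
  split
  · exact Or.inl rfl
  · exact Or.inr rfl

-- ===== VERDICT (by name: the statement is the Claim_ definition above) =====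
theorem lock_spec : Claim_equal_lock := by
  intro n angle _ hpre
  obtain ⟨h0, hlen⟩ := hpre
  unfold Spec_lock
  have hiff := (lock_eq_yes_iff n angle h0 hlen).trans (lock_alt_eq_yes_iff n angle h0 hlen).symm
  rcases lock_values n angle with hA | hA <;> rcases lock_alt_values n angle with hB | hB
  · rw [hA, hB]
  · exact absurd (hiff.mp hA) (by rw [hB]; decide)
  · exact absurd (hiff.mpr hB) (by rw [hA]; decide)
  · rw [hA, hB]
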